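-- pv_equiv track=rewrite | github.com/BoriTha/Game-Dev-Haridd | src/level/pcg_postprocess.py | _find_largest_run_in_list
-- ===== SOURCE A (Python) =====
-- from typing import Tuple, List, Optional, Set
--
-- def _find_largest_run_in_list(sorted_positions: List[int], center: int) -> Tuple[int,int]:
--     # sorted_positions is a sorted list of x positions where we changed tiles
--     if not sorted_positions:
--         return (0, 0)
--     runs: List[Tuple[int,int]] = []
--     start = sorted_positions[0]
--     prev = start
--     for p in sorted_positions[1:]:
--         if p == prev + 1:
--             prev = p
--             continue
--         runs.append((start, prev))
--         start = p; prev = p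
--     runs.append((start, prev))
--     # prefer run containing center
--     for a,b in runs:
--         if a <= center <= b:
--             return (a, b - a + 1)
--     # otherwise return largest run
--     best = runs[0]
--     best_len = best[1] - best[0] + 1
--     for a,b in runs[1:]:
--         l = b - a + 1
--         if l > best_len:
--             best = (a,b); best_len = l
--     return (best[0], best[1] - best[0] + 1)
-- ===== SOURCE B (Python) =====
-- from typing import Tuple, List
--
-- def _find_largest_run_in_list(sorted_positions: List[int], center: int) -> Tuple[int, int]:
--     # Single pass: maintain the current run, the best run so far (strictly
--     # greater length wins, so the earliest best is kept) and the first run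
--     # that contains center; no intermediate list of runs is built.
--     if not sorted_positions:
--         return (0, 0)
--     best = None         # (a, b) of best-length run seen so far
--     center_run = None   # first closed run with a <= center <= b
--     start = prev = sorted_positions[0]
--
--     def close(a, b):
--         nonlocal best, center_run
--         if center_run is None and a <= center <= b:
--             center_run = (a, b)
--         if best is None or b - a > best[1] - best[0]:
--             best = (a, b)
--
--     for p in sorted_positions[1:]:
--         if p == prev + 1:
--             prev = p
--         else:
--             close(start, prev)
--             start = prev = p
--     close(start, prev)
--     a, b = center_run if center_run is not None else best
--     return (a, b - a + 1)
-- ===== Notes on version B (the rewrite author's own statement) =====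
-- stated objective: simpler
-- what changed: B fuses A's three passes (build a runs list, scan it for the run containing center, scan it again for the longest run) into one pass that keeps only the current run, the first center-containing run and the best-so-far run, so no intermediate runs list is built.
import Mathlib
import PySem

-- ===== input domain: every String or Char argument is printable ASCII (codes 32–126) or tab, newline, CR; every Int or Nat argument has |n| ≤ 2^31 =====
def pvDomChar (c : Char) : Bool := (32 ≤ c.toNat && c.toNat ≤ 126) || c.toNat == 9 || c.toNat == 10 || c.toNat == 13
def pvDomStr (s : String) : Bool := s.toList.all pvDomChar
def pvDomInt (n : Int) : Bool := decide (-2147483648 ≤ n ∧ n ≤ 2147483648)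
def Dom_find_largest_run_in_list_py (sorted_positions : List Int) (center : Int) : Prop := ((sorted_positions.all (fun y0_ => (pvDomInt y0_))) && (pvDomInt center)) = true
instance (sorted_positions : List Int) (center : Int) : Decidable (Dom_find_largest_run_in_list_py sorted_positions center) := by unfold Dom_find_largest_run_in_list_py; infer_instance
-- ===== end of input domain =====

-- B fuses A's three passes (build runs list, scan for the center run, scan for the
-- longest run) into one pass that keeps only the current run, the first center run
-- and the best run so far; objective: simpler (no intermediate runs list).

-- ===== PORT A =====
-- the run-building for-loop of A (runs/start/prev state, append on gap)
def buildRunsA (rest : List Int) (start prev : Int) (runs : List (Int × Int)) : List (Int × Int) :=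
  match rest with
  | [] => runs ++ [(start, prev)]
  | p :: t =>
    if p = prev + 1 then buildRunsA t start p runs
    else buildRunsA t p p (runs ++ [(start, prev)])

-- A's 'for a,b in runs: if a <= center <= b: return …' early-return loop
def centerScanA (center : Int) (runs : List (Int × Int)) : Option (Int × Int) :=
  match runs with
  | [] => none
  | (a, b) :: t =>
    if a ≤ center ∧ center ≤ b then some (a, b - a + 1) else centerScanA center t

-- A's 'for a,b in runs[1:]' best/best_len loop
def bestLoopA (runs : List (Int × Int)) (best : Int × Int) (best_len : Int) : Int × Int :=
  match runs with
  | [] => (best.1, best.2 - best.1 + 1)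
  | (a, b) :: t =>
    let l := b - a + 1
    if l > best_len then bestLoopA t (a, b) l else bestLoopA t best best_len

def find_largest_run_in_list_py (sorted_positions : List Int) (center : Int) : Int × Int :=
  match sorted_positions with
  | [] => (0, 0)
  | x :: rest =>
    let runs := buildRunsA rest x x []
    match centerScanA center runs with
    | some r => r
    | none =>
      match runs with
      | [] => (0, 0)  -- unreachable: runs always gets at least one append
      | best :: rt => bestLoopA rt best (best.2 - best.1 + 1)

-- ===== PORT B =====
-- Source B's close(a, b): update the center slot (first match only) and the best slot
def closeB (center a b : Int) (best cr : Option (Int × Int)) :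
    Option (Int × Int) × Option (Int × Int) :=
  let cr' := match cr with
    | some r => some r
    | none => if a ≤ center ∧ center ≤ b then some (a, b) else none
  let best' := match best with
    | none => some (a, b)
    | some (c, d) => if b - a > d - c then some (a, b) else some (c, d)
  (best', cr')

-- Source B's single for-loop plus the final close and return
def loopB (center : Int) (rest : List Int) (start prev : Int)
    (best cr : Option (Int × Int)) : Int × Int :=
  match rest with
  | [] =>
    let (best', cr') := closeB center start prev best cr
    match cr' with
    | some (a, b) => (a, b - a + 1)
    | none =>
      match best' with
      | some (a, b) => (a, b - a + 1)
      | none => (0, 0)  -- unreachable: close always fills best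
  | p :: t =>
    if p = prev + 1 then loopB center t start p best cr
    else
      let (best', cr') := closeB center start prev best cr
      loopB center t p p best' cr'

def find_largest_run_in_list_py_alt (sorted_positions : List Int) (center : Int) : Int × Int :=
  match sorted_positions with
  | [] => (0, 0)
  | x :: rest => loopB center rest x x none none

-- ===== PRECONDITION & SPEC =====
def Spec_find_largest_run_in_list_py (sorted_positions : List Int) (center : Int) (out : Int × Int) : Prop := out = find_largest_run_in_list_py_alt sorted_positions center
instance (sorted_positions : List Int) (center : Int) (out : Int × Int) : Decidable (Spec_find_largest_run_in_list_py sorted_positions center out) := by unfold Spec_find_largest_run_in_list_py; infer_instance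

-- ===== CLAIM (what is proved, stated in full; the proofs are below) =====
def Claim_equal_find_largest_run_in_list_py : Prop := ∀ (sorted_positions : List Int) (center : Int), Dom_find_largest_run_in_list_py sorted_positions center → Spec_find_largest_run_in_list_py sorted_positions center (find_largest_run_in_list_py sorted_positions center)

-- ===== LEMMAS AND PROOFS =====

-- proof-only helpers: componentwise view of B's fold over the closed runs
def bstep (st : Option (Int × Int)) (r : Int × Int) : Option (Int × Int) :=
  match st with
  | none => some r
  | some (c, d) => if r.2 - r.1 > d - c then some r else some (c, d)

def cstep (center : Int) (st : Option (Int × Int)) (r : Int × Int) : Option (Int × Int) :=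
  match st with
  | some q => some q
  | none => if r.1 ≤ center ∧ center ≤ r.2 then some r else none

def stepB (center : Int) (st : Option (Int × Int) × Option (Int × Int)) (r : Int × Int) :
    Option (Int × Int) × Option (Int × Int) :=
  closeB center r.1 r.2 st.1 st.2

def fmt : Option (Int × Int) → Int × Int
  | some (a, b) => (a, b - a + 1)
  | none => (0, 0)

def outB (st : Option (Int × Int) × Option (Int × Int)) : Int × Int :=
  match st.2 with
  | some (a, b) => (a, b - a + 1)
  | none => fmt st.1

theorem buildRunsA_acc (t : List Int) : ∀ (s v : Int) (acc : List (Int × Int)),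
    buildRunsA t s v acc = acc ++ buildRunsA t s v [] := by
  induction t with
  | nil => intro s v acc; rfl
  | cons p t ih =>
      intro s v acc
      by_cases h : p = v + 1
      · simp only [buildRunsA, if_pos h]; exact ih s p acc
      · simp only [buildRunsA, if_neg h]
        rw [List.nil_append, ih p p (acc ++ [(s, v)]), ih p p [(s, v)]]
        simp

theorem buildRunsA_ne_nil (t : List Int) (s v : Int) (acc : List (Int × Int)) :
    buildRunsA t s v acc ≠ [] := by
  induction t generalizing s v acc with
  | nil => simp [buildRunsA]
  | cons p t ih => by_cases h : p = v + 1 <;> simp [buildRunsA, h, ih]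

theorem loopB_eq (center : Int) (t : List Int) : ∀ (s v : Int) (best cr : Option (Int × Int)),
    loopB center t s v best cr =
      outB (List.foldl (stepB center) (best, cr) (buildRunsA t s v [])) := by
  induction t with
  | nil =>
      intro s v best cr
      simp only [loopB, buildRunsA, List.nil_append, List.foldl_cons, List.foldl_nil]
      rcases h : closeB center s v best cr with ⟨b', c'⟩
      simp [outB, stepB, h]
      rcases c' with _ | ⟨a, b⟩ <;> simp [fmt]
  | cons p t ih =>
      intro s v best cr
      by_cases h : p = v + 1
      · simp [loopB, buildRunsA, h, ih]
      · simp only [loopB, if_neg h, buildRunsA]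
        rcases hc : closeB center s v best cr with ⟨b', c'⟩
        rw [List.nil_append, ih p p b' c', buildRunsA_acc t p p [(s, v)]]
        simp [stepB, hc]

theorem foldl_stepB_pair (center : Int) (rs : List (Int × Int)) :
    ∀ (best cr : Option (Int × Int)),
      List.foldl (stepB center) (best, cr) rs =
        (List.foldl bstep best rs, List.foldl (cstep center) cr rs) := by
  induction rs with
  | nil => intro best cr; simp
  | cons r t ih =>
      intro best cr
      rcases r with ⟨a, b⟩
      simp only [List.foldl_cons, ih]
      rfl

theorem cstep_some (center : Int) (rs : List (Int × Int)) (q : Int × Int) :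
    List.foldl (cstep center) (some q) rs = some q := by
  induction rs with
  | nil => rfl
  | cons r t ih => simp [cstep, ih]

theorem centerScanA_eq (center : Int) (rs : List (Int × Int)) :
    centerScanA center rs = (List.foldl (cstep center) none rs).map (fun r => (r.1, r.2 - r.1 + 1)) := by
  induction rs with
  | nil => rfl
  | cons r t ih =>
      rcases r with ⟨a, b⟩
      by_cases h : a ≤ center ∧ center ≤ b
      · simp [centerScanA, cstep, h, cstep_some]
      · simp [centerScanA, cstep, h, ih]

theorem bestLoopA_eq (rt : List (Int × Int)) : ∀ (b0 : Int × Int),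
    bestLoopA rt b0 (b0.2 - b0.1 + 1) = fmt (List.foldl bstep (some b0) rt) := by
  induction rt with
  | nil => intro b0; simp [bestLoopA, fmt]
  | cons r t ih =>
      intro b0
      rcases r with ⟨a, b⟩
      rcases b0 with ⟨c, d⟩
      simp only [bestLoopA, List.foldl_cons, bstep]
      by_cases h : b - a + 1 > d - c + 1
      · rw [if_pos h, if_pos (by omega : b - a > d - c)]
        exact ih (a, b)
      · rw [if_neg h, if_neg (by omega : ¬ b - a > d - c)]
        exact ih (c, d)

-- ===== VERDICT (by name: the statement is the Claim_ definition above) =====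
theorem find_largest_run_in_list_py_spec : Claim_equal_find_largest_run_in_list_py := by
  intro sp center _
  unfold Spec_find_largest_run_in_list_py
  cases sp with
  | nil => rfl
  | cons x rest =>
      show find_largest_run_in_list_py (x :: rest) center
          = find_largest_run_in_list_py_alt (x :: rest) center
      simp only [find_largest_run_in_list_py, find_largest_run_in_list_py_alt]
      rw [loopB_eq, foldl_stepB_pair, centerScanA_eq]
      rcases hrs : buildRunsA rest x x [] with _ | ⟨b0, rt⟩
      · exact absurd hrs (buildRunsA_ne_nil rest x x [])
      · rcases hc : List.foldl (cstep center) none (b0 :: rt) with _ | ⟨a, b⟩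
        · simp only [Option.map_none, outB]
          simp only [List.foldl_cons]
          show bestLoopA rt b0 (b0.2 - b0.1 + 1) = fmt (List.foldl bstep (bstep none b0) rt)
          rw [show bstep none b0 = some b0 from rfl]
          exact bestLoopA_eq rt b0
        · simp [outB]
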